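-- pv_equiv track=rewrite | github.com/Aminehassou/spaghetti-code | IOI/frogRace.py | getWinnerIndex
-- ===== SOURCE A (Python) =====
-- def getWinnerIndex(distances):
--     counter = 0
--     currentWinDistance = max(distances)
--     for y in distances:
--         if currentWinDistance == y:
--             counter += 1
--     if counter > 1:
--         return -1
--     for x in range(len(distances)):
--         if currentWinDistance == distances[x]:
--             return x
--     return -1
-- ===== SOURCE B (Python) =====
-- def getWinnerIndex(distances):
--     best_val = None
--     best_idx = -1
--     unique = False
--     for i, d in enumerate(distances):
--         if best_val is None or d > best_val:
--             best_val = d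
--             best_idx = i
--             unique = True
--         elif d == best_val:
--             unique = False
--     return best_idx if unique else -1
-- ===== Notes on version B (the rewrite author's own statement) =====
-- stated objective: alternative
-- what changed: Replaces A's three scans (max, tie-count loop, index-search loop) with a single pass over enumerate(distances) maintaining the running max, its first occurrence index and a uniqueness flag.
import Mathlib
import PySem

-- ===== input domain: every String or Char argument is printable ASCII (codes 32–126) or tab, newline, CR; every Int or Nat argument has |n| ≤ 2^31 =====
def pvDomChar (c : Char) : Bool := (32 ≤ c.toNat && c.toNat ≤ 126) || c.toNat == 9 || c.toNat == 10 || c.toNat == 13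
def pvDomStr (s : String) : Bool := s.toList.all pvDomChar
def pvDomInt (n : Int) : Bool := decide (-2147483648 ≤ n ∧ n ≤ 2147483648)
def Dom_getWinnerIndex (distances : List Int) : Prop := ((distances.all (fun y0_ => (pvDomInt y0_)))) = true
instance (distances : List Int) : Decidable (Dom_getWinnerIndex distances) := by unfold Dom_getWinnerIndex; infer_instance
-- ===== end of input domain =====

-- B replaces A's three scans (max, tie-count loop, index-search loop) with one pass
-- over enumerate(distances) keeping the running max, its first index and a unique flag.

-- ===== PORT A =====
-- A's second loop: 'for x in range(len(distances)): if m == distances[x]: return x'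
def pvFindFrom (m : Int) (ds : List Int) (x : Nat) : Int :=
  if h : x < ds.length then
    if m == ds[x] then (x : Int) else pvFindFrom m ds (x + 1)
  else -1
termination_by ds.length - x

def getWinnerIndex (distances : List Int) : Int :=
  match PySem.List.max? distances (fun y => y) with
  | none => -1  -- Python raises ValueError here; excluded by Pre_getWinnerIndex
  | some currentWinDistance =>
    let counter : Int :=
      distances.foldl (fun c y => if currentWinDistance == y then c + 1 else c) 0
    if counter > 1 then -1
    else pvFindFrom currentWinDistance distances 0

-- ===== PORT B =====
def getWinnerIndex_alt (distances : List Int) : Int :=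
  let st := (PySem.List.enumerate distances 0).foldl
    (fun (s : Option Int × Int × Bool) p =>
      match s.1 with
      | none => (some p.2, p.1, true)
      | some v =>
        if p.2 > v then (some p.2, p.1, true)
        else if p.2 == v then (s.1, s.2.1, false)
        else s)
    (none, -1, false)
  if st.2.2 then st.2.1 else -1

-- ===== PRECONDITION & SPEC =====
-- Pre_ excludes only the empty list, on which A raises ValueError (max of empty sequence).
def Pre_getWinnerIndex (distances : List Int) : Prop := distances ≠ []
instance (distances : List Int) : Decidable (Pre_getWinnerIndex distances) := by
  unfold Pre_getWinnerIndex; infer_instance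

def pvWitness_getWinnerIndex : List Int := [3, 1, 2]

def Spec_getWinnerIndex (distances : List Int) (out : Int) : Prop := out = getWinnerIndex_alt distances
instance (distances : List Int) (out : Int) : Decidable (Spec_getWinnerIndex distances out) := by unfold Spec_getWinnerIndex; infer_instance

-- ===== CLAIM (what is proved, stated in full; the proofs are below) =====
def Claim_equal_getWinnerIndex : Prop := ∀ (distances : List Int), Dom_getWinnerIndex distances → Pre_getWinnerIndex distances → Spec_getWinnerIndex distances (getWinnerIndex distances)
-- ===== LEMMAS AND PROOFS =====

-- proof-side name for B's fold step
def pvBStepFn : (Option Int × Int × Bool) → (Int × Int) → (Option Int × Int × Bool) :=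
  fun s p =>
    match s.1 with
    | none => (some p.2, p.1, true)
    | some v =>
      if p.2 > v then (some p.2, p.1, true)
      else if p.2 == v then (s.1, s.2.1, false)
      else s

theorem pvBStep_some (v bi : Int) (u : Bool) (p : Int × Int) :
    pvBStepFn (some v, bi, u) p =
      if p.2 > v then (some p.2, p.1, true)
      else if p.2 == v then (some v, bi, false)
      else (some v, bi, u) := rfl

-- A's counting loop counts occurrences of m
theorem pvCountLoop (m : Int) (l : List Int) (a : Int) :
    l.foldl (fun c y => if m == y then c + 1 else c) a = a + (l.count m : Int) := by
  have hf : (fun (c y : Int) => if m == y then c + 1 else c)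
      = (fun (c y : Int) => if y == m then c + 1 else c) := by
    funext c y
    by_cases h : y = m
    · simp [h]
    · simp [h, Ne.symm h]
  rw [hf, PySem.List.foldl_beq_add_one]

-- A's search loop finds the first index ≥ x holding m
theorem pvFindFrom_spec (m : Int) (l : List Int) (x : Nat) :
    pvFindFrom m l x =
      if m ∈ l.drop x then ((x + (l.drop x).idxOf m : Nat) : Int) else -1 := by
  by_cases h : x < l.length
  · have hd : l.drop x = l[x] :: l.drop (x + 1) := List.drop_eq_getElem_cons h
    rw [pvFindFrom, dif_pos h, hd]
    by_cases he : m = l[x]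
    · rw [if_pos (by simp [he])]
      simp [← he]
    · have hb : (m == l[x]) = false := by simp [he]
      have hb' : (l[x] == m) = false := by simp [Ne.symm he]
      rw [if_neg (by simp [hb]), pvFindFrom_spec m l (x + 1)]
      simp only [List.mem_cons, List.idxOf_cons, hb', cond_false]
      by_cases hm : m ∈ l.drop (x + 1)
      · rw [if_pos hm, if_pos (Or.inr hm)]
        push_cast; ring
      · rw [if_neg hm, if_neg (by simp [he, hm])]
  · rw [pvFindFrom, dif_neg h]
    have hnil : l.drop x = [] := List.drop_eq_nil_of_le (by omega)
    simp [hnil]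
termination_by l.length - x

-- invariant of B's fold once the state carries a running max
theorem pvBInv (l : List Int) (s v bi : Int) (u : Bool) :
    (PySem.List.enumerate l s).foldl pvBStepFn (some v, bi, u)
    = (some (l.foldl max v),
       if v < l.foldl max v then s + ((l.idxOf (l.foldl max v) : Nat) : Int) else bi,
       if v < l.foldl max v then (l.count (l.foldl max v) == 1)
       else u && (l.count v == 0)) := by
  induction l generalizing s v bi u with
  | nil => simp
  | cons d t ih =>
    rw [PySem.List.enumerate_cons, List.foldl_cons, pvBStep_some]
    simp only [List.foldl_cons]
    by_cases h1 : d > v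
    · have hmax : max v d = d := max_eq_right (le_of_lt h1)
      have hdM := (PySem.List.le_foldl_max t d).1
      rw [if_pos h1, hmax, ih (s + 1) d s true]
      by_cases h2 : d < t.foldl max d
      · have hne : d ≠ t.foldl max d := ne_of_lt h2
        have hv : v < t.foldl max d := lt_trans h1 h2
        have hb : (d == t.foldl max d) = false := by simp [hne]
        simp only [if_pos h2, if_pos hv, List.idxOf_cons, hb, cond_false,
          List.count_cons, Bool.true_and]
        simp only [Prod.mk.injEq]
        refine ⟨by first | trivial | rfl, by push_cast; ring,
          by rw [Bool.eq_iff_iff]; simp; try omega⟩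
      · have heq : t.foldl max d = d := le_antisymm (by omega) hdM
        simp only [heq, lt_irrefl, if_false, if_pos h1, List.idxOf_cons,
          beq_self_eq_true, cond_true, List.count_cons, Bool.true_and]
        simp only [Prod.mk.injEq]
        refine ⟨by first | trivial | rfl, by push_cast; ring,
          by rw [Bool.eq_iff_iff]; simp; try omega⟩
    · have hmax : max v d = v := max_eq_left (by omega)
      have hvM := (PySem.List.le_foldl_max t v).1
      by_cases h2 : d = v
      · subst h2
        rw [if_neg h1, if_pos (by simp), hmax, ih (s + 1) d bi false]
        by_cases h3 : d < t.foldl max d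
        · have hne : d ≠ t.foldl max d := ne_of_lt h3
          have hb : (d == t.foldl max d) = false := by simp [hne]
          simp only [if_pos h3, List.idxOf_cons, hb, cond_false, List.count_cons,
            Bool.true_and]
          simp only [Prod.mk.injEq]
          refine ⟨by first | trivial | rfl, by push_cast; ring,
            by rw [Bool.eq_iff_iff]; simp; try omega⟩
        · have heq : t.foldl max d = d :=
            le_antisymm (by omega) (PySem.List.le_foldl_max t d).1
          simp [heq, List.count_cons]
      · have hlt : d < v := lt_of_le_of_ne (by omega) h2
        rw [if_neg h1, if_neg (by simp [h2]), hmax, ih (s + 1) v bi u]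
        by_cases h3 : v < t.foldl max v
        · have hne : d ≠ t.foldl max v := ne_of_lt (lt_trans hlt h3)
          have hb : (d == t.foldl max v) = false := by simp [hne]
          simp only [if_pos h3, List.idxOf_cons, hb, cond_false, List.count_cons,
            Bool.true_and]
          simp only [Prod.mk.injEq]
          refine ⟨by first | trivial | rfl, by push_cast; ring,
            by rw [Bool.eq_iff_iff]; simp; try omega⟩
        · have heq : t.foldl max v = v := le_antisymm (by omega) hvM
          have hb0 : (d == v) = false := by simp [h2]
          simp [heq, List.count_cons, hb0]

-- ===== VERDICT (by name: the statement is the Claim_ definition above) =====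
theorem getWinnerIndex_spec : Claim_equal_getWinnerIndex := by
  intro distances _ hpre
  unfold Spec_getWinnerIndex
  obtain ⟨d, t, rfl⟩ : ∃ d t, distances = d :: t := by
    cases distances with
    | nil => exact absurd rfl hpre
    | cons d t => exact ⟨d, t, rfl⟩
  set M := t.foldl max d with hM
  have hdM := (PySem.List.le_foldl_max t d).1
  -- evaluate A
  unfold getWinnerIndex
  rw [PySem.List.max?_id_cons]
  simp only [← hM]
  rw [pvCountLoop, pvFindFrom_spec]
  have hmem : M ∈ d :: t := PySem.List.max?_mem (by rw [PySem.List.max?_id_cons, hM])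
  have hcpos : 0 < (d :: t).count M := List.count_pos_iff.mpr hmem
  -- evaluate B
  have hB : getWinnerIndex_alt (d :: t) =
      (if (List.foldl pvBStepFn (some d, 0, true) (PySem.List.enumerate t 1)).2.2
       then (List.foldl pvBStepFn (some d, 0, true) (PySem.List.enumerate t 1)).2.1
       else -1) := rfl
  rw [hB, pvBInv t 1 d 0 true]
  by_cases h2 : d < M
  · have hne : d ≠ M := ne_of_lt h2
    have hb : (d == M) = false := by simp [hne]
    simp only [← hM, if_pos h2, Bool.true_and]
    have hcount : (d :: t).count M = t.count M := by simp [List.count_cons, hb]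
    have hidx : (d :: t).idxOf M = t.idxOf M + 1 := by simp [List.idxOf_cons, hb]
    simp only [List.drop_zero, hcount, hidx]
    by_cases hc1 : t.count M = 1
    · rw [if_neg (by omega : ¬ ((0 : Int) + (t.count M : Int) > 1)), if_pos hmem,
        if_pos (by simp [hc1])]
      push_cast; ring
    · have h1' : 0 < t.count M := by rw [← hcount]; exact hcpos
      rw [if_pos (by omega : (0 : Int) + (t.count M : Int) > 1), if_neg (by simp [hc1])]
  · have heq : M = d := le_antisymm (by omega) hdM
    simp only [← hM, if_neg h2]
    have hcount : (d :: t).count M = t.count M + 1 := by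
      simp [heq, List.count_cons]
    have hidx : (d :: t).idxOf M = 0 := by simp [heq, List.idxOf_cons]
    simp only [List.drop_zero, hcount, hidx, Bool.true_and]
    by_cases hc0 : t.count M = 0
    · rw [if_neg (by push_cast; omega), if_pos hmem, if_pos (by rw [← heq]; simp [hc0])]
      simp
    · rw [if_pos (by push_cast; omega), if_neg (by rw [← heq]; simp [hc0])]
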